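-- pv_equiv track=rewrite | github.com/LordCury/projeto-faturamento-ai | query_pipeline.py | corrigir_placeholders
-- ===== SOURCE A (Python) =====
-- def corrigir_placeholders(query: str) -> str:
--     substituicoes = {
--         "{Start}": "'2024-01-01 00:00:00'",
--         "{End}": "'2026-12-31 23:59:59'",
--         "{Start_1}": "'2024-01-01 00:00:00'",
--         "{End_1}": "'2026-12-31 23:59:59'",
--         "{Start_M}": "'2024-01-01 00:00:00'",
--     }
--
--     for antigo, novo in substituicoes.items():
--         query = query.replace(antigo, novo)
--
--     return query
-- ===== SOURCE B (Python) =====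
-- def corrigir_placeholders(query: str) -> str:
--     # one left-to-right scan over the query; longest tokens tried first
--     tokens = [
--         ("{Start_1}", "'2024-01-01 00:00:00'"),
--         ("{Start_M}", "'2024-01-01 00:00:00'"),
--         ("{End_1}", "'2026-12-31 23:59:59'"),
--         ("{Start}", "'2024-01-01 00:00:00'"),
--         ("{End}", "'2026-12-31 23:59:59'"),
--     ]
--     out = []
--     i = 0
--     n = len(query)
--     while i < n:
--         if query[i] == "{":
--             for tok, val in tokens:
--                 if query.startswith(tok, i):
--                     out.append(val)
--                     i += len(tok)
--                     break
--             else: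
--                 out.append(query[i])
--                 i += 1
--         else:
--             out.append(query[i])
--             i += 1
--     return "".join(out)
-- ===== Notes on version B (the rewrite author's own statement) =====
-- stated objective: alternative
-- what changed: A runs five sequential full-string str.replace passes (one per placeholder); B builds the output in a single left-to-right scan that tries the five placeholder tokens (longest first) at each position.
import Mathlib
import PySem

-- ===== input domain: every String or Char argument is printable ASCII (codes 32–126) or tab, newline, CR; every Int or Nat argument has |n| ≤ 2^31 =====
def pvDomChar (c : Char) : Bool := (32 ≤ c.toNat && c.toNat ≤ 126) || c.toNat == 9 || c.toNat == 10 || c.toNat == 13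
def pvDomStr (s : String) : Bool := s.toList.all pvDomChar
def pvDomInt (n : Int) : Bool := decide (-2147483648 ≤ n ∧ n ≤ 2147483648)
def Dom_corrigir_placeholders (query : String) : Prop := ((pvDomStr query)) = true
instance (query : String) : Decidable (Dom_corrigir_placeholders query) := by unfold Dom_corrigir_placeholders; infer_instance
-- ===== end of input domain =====

set_option maxRecDepth 8000

-- B replaces A's five sequential full-string .replace passes by ONE left-to-right scan that
-- tries the placeholder tokens (longest first) at each position; objective: alternative (single-pass traversal).

-- ===== PORT A =====
def corrigir_placeholders (query : String) : String :=
  -- for antigo, novo in substituicoes.items(): query = query.replace(antigo, novo)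
  let q1 := PySem.Str.replace query "{Start}" "'2024-01-01 00:00:00'"
  let q2 := PySem.Str.replace q1 "{End}" "'2026-12-31 23:59:59'"
  let q3 := PySem.Str.replace q2 "{Start_1}" "'2024-01-01 00:00:00'"
  let q4 := PySem.Str.replace q3 "{End_1}" "'2026-12-31 23:59:59'"
  PySem.Str.replace q4 "{Start_M}" "'2024-01-01 00:00:00'"

-- ===== PORT B =====
-- the single scan of Source B: at each position, if the char is '{' try the five tokens (longest first)
def pvScanGo : List Char → List Char
  | [] => []
  | c :: t =>
    if c = '{' then
      if List.isPrefixOf "{Start_1}".toList (c :: t) then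
        "'2024-01-01 00:00:00'".toList ++ pvScanGo (List.drop 9 (c :: t))
      else if List.isPrefixOf "{Start_M}".toList (c :: t) then
        "'2024-01-01 00:00:00'".toList ++ pvScanGo (List.drop 9 (c :: t))
      else if List.isPrefixOf "{End_1}".toList (c :: t) then
        "'2026-12-31 23:59:59'".toList ++ pvScanGo (List.drop 7 (c :: t))
      else if List.isPrefixOf "{Start}".toList (c :: t) then
        "'2024-01-01 00:00:00'".toList ++ pvScanGo (List.drop 7 (c :: t))
      else if List.isPrefixOf "{End}".toList (c :: t) then
        "'2026-12-31 23:59:59'".toList ++ pvScanGo (List.drop 5 (c :: t))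
      else c :: pvScanGo t
    else c :: pvScanGo t
termination_by l => l.length
decreasing_by all_goals (simp only [List.length_drop, List.length_cons]; omega)

def corrigir_placeholders_alt (query : String) : String :=
  String.ofList (pvScanGo query.toList)

-- ===== PRECONDITION & SPEC =====
def Spec_corrigir_placeholders (query : String) (out : String) : Prop := out = corrigir_placeholders_alt query
instance (query : String) (out : String) : Decidable (Spec_corrigir_placeholders query out) := by unfold Spec_corrigir_placeholders; infer_instance

-- ===== CLAIM (what is proved, stated in full; the proofs are below) =====
def Claim_equal_corrigir_placeholders : Prop := ∀ (query : String), Dom_corrigir_placeholders query → Spec_corrigir_placeholders query (corrigir_placeholders query)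

-- ===== LEMMAS AND PROOFS =====

-- structural one-token replacer; equals PySem.Chars.replace for a nonempty pattern
def repOne (old new : List Char) : List Char → List Char
  | [] => []
  | c :: t =>
    if List.isPrefixOf old (c :: t) then new ++ repOne old new (List.drop (old.length - 1) t)
    else c :: repOne old new t
termination_by l => l.length
decreasing_by all_goals (simp only [List.length_drop, List.length_cons]; omega)

theorem repOne_nil (old new : List Char) : repOne old new [] = [] := by rw [repOne]

theorem repOne_cons_neg (old new : List Char) (c : Char) (t : List Char)
    (h : List.isPrefixOf old (c :: t) = false) :
    repOne old new (c :: t) = c :: repOne old new t := by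
  rw [repOne]; simp [h]

theorem repOne_match (old new x : List Char) (h : old ≠ []) :
    repOne old new (old ++ x) = new ++ repOne old new x := by
  cases old with
  | nil => exact absurd rfl h
  | cons o os =>
    rw [List.cons_append, repOne]
    have hp : List.isPrefixOf (o :: os) (o :: (os ++ x)) = true := by
      rw [List.isPrefixOf_iff_prefix, ← List.cons_append]
      exact List.prefix_append _ _
    simp [hp]

theorem repOne_append_noBrace (old new p x : List Char) (oT : List Char)
    (hold : old = '{' :: oT) (hp : ∀ ch ∈ p, ch ≠ '{') :
    repOne old new (p ++ x) = p ++ repOne old new x := by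
  induction p with
  | nil => simp
  | cons q p' ih =>
    have hq : q ≠ '{' := hp q (by simp)
    have hpre : List.isPrefixOf old (q :: (p' ++ x)) = false := by
      subst hold; simp [List.isPrefixOf, (Ne.symm hq)]
    rw [List.cons_append, repOne_cons_neg _ _ _ _ hpre, ih (fun ch hch => hp ch (by simp [hch])),
        List.cons_append]

-- one repOne layer passes unchanged over a foreign token it does not match at the front
theorem repOne_pass (old new tok x : List Char) (oT tT : List Char)
    (hold : old = '{' :: oT) (htok : tok = '{' :: tT) (hT : ∀ ch ∈ tT, ch ≠ '{')
    (hpre : List.isPrefixOf old (tok ++ x) = false) :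
    repOne old new (tok ++ x) = tok ++ repOne old new x := by
  subst htok
  rw [List.cons_append] at hpre ⊢
  rw [repOne_cons_neg _ _ _ _ hpre,
      repOne_append_noBrace old new tT x oT hold hT, List.cons_append]

-- prefix tests by a brace-free, quote-free pattern are invariant under repOne
theorem pinv (old new : List Char) (oT nT : List Char)
    (h0 : old = '{' :: oT) (h1 : new = '\'' :: nT) :
    ∀ (x p : List Char), (∀ ch ∈ p, ch ≠ '{' ∧ ch ≠ '\'') →
      List.isPrefixOf p (repOne old new x) = List.isPrefixOf p x := by
  intro x
  induction x with
  | nil => intro p hp; rw [repOne_nil]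
  | cons c t ih =>
    intro p hp
    by_cases hpre : List.isPrefixOf old (c :: t) = true
    · have hc : c = '{' := by
        subst h0
        simp [List.isPrefixOf] at hpre
        exact hpre.1.symm
      rw [repOne]; simp only [hpre, if_true]
      cases p with
      | nil => simp
      | cons q p' =>
        have hq := hp q (by simp)
        subst h1
        rw [List.cons_append]
        have e1 : (q == '\'') = false := by simp [hq.2]
        have e2 : (q == '{') = false := by simp [hq.1]
        simp [List.isPrefixOf, hc, e1, e2]
    · have hpre' : List.isPrefixOf old (c :: t) = false := by
        cases h : List.isPrefixOf old (c :: t) with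
        | true => exact absurd h hpre
        | false => rfl
      rw [repOne_cons_neg _ _ _ _ hpre']
      cases p with
      | nil => simp
      | cons q p' =>
        simp only [List.isPrefixOf]
        by_cases hqc : (q == c) = true
        · simp only [hqc, Bool.true_and]
          exact ih p' (fun ch hch => hp ch (by simp [hch]))
        · simp [hqc]

-- the value of A, written over lists: the five sequential replaces
def pvF (x : List Char) : List Char :=
  repOne "{Start_M}".toList "'2024-01-01 00:00:00'".toList
    (repOne "{End_1}".toList "'2026-12-31 23:59:59'".toList
      (repOne "{Start_1}".toList "'2024-01-01 00:00:00'".toList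
        (repOne "{End}".toList "'2026-12-31 23:59:59'".toList
          (repOne "{Start}".toList "'2024-01-01 00:00:00'".toList x))))

theorem go_eq (old new : List Char) (hold : old ≠ []) :
    ∀ (fuel : Nat) (l acc : List Char), l.length ≤ fuel →
      PySem.Chars.replace.go old new fuel l acc = acc.reverse ++ repOne old new l := by
  intro fuel
  induction fuel with
  | zero =>
    intro l acc hl
    have : l = [] := List.length_eq_zero_iff.mp (Nat.le_zero.mp hl)
    subst this
    rw [PySem.Chars.replace.go]; simp [repOne_nil]
  | succ n ih =>
    intro l acc hl
    cases l with
    | nil => rw [PySem.Chars.replace.go] <;> simp [repOne_nil]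
    | cons c t =>
      rw [PySem.Chars.replace.go]
      by_cases hpre : List.isPrefixOf old (c :: t) = true
      · obtain ⟨o, os, rfl⟩ : ∃ o os, old = o :: os := by
          cases old with
          | nil => exact absurd rfl hold
          | cons o os => exact ⟨o, os, rfl⟩
        simp only [hpre, if_true]
        rw [ih _ _ (by simp at hl ⊢; omega)]
        rw [repOne]; simp [hpre]
      · simp only [hpre, if_false, Bool.false_eq_true]
        rw [ih _ _ (by simp at hl ⊢; omega)]
        rw [repOne_cons_neg _ _ _ _ (by
          cases h : List.isPrefixOf old (c :: t) with
          | true => exact absurd h hpre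
          | false => rfl)]
        simp
theorem replace_eq_repOne (s old new : List Char) (h : old ≠ []) :
    PySem.Chars.replace s old new = repOne old new s := by
  rw [PySem.Chars.replace]
  simp [List.isEmpty_iff, h]
  rw [go_eq old new h s.length s [] (le_refl _)]
  simp

theorem A_toList (query : String) :
    (corrigir_placeholders query).toList = pvF query.toList := by
  unfold corrigir_placeholders pvF
  simp only [PySem.Str.toList_replace]
  rw [replace_eq_repOne _ _ _ (by decide), replace_eq_repOne _ _ _ (by decide),
      replace_eq_repOne _ _ _ (by decide), replace_eq_repOne _ _ _ (by decide),
      replace_eq_repOne _ _ _ (by decide)]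

-- literal evaluations of the string constants (a single decide on a 21-char string overflows)
theorem evRepS : "'2024-01-01 00:00:00'".toList = ['\'','2','0','2','4','-','0','1','-','0','1',' ','0','0',':','0','0',':','0','0','\''] := by
  rw [show "'2024-01-01 00:00:00'" = "'2024-0" ++ "1-01 00" ++ ":00:00'" from by decide,
      String.toList_append, String.toList_append]
  decide

theorem evRepE : "'2026-12-31 23:59:59'".toList = ['\'','2','0','2','6','-','1','2','-','3','1',' ','2','3',':','5','9',':','5','9','\''] := by
  rw [show "'2026-12-31 23:59:59'" = "'2026-1" ++ "2-31 23" ++ ":59:59'" from by decide,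
      String.toList_append, String.toList_append]
  decide

theorem evEx : "End}".toList = ['E','n','d','}'] := by decide
theorem evS1x : "Start_1}".toList = ['S','t','a','r','t','_','1','}'] := by decide
theorem evE1x : "End_1}".toList = ['E','n','d','_','1','}'] := by decide
theorem evSMx : "Start_M}".toList = ['S','t','a','r','t','_','M','}'] := by decide

-- convenient instances of pinv for the five tokens (patterns start with a brace, replacements with a quote)
theorem pinv_S (x p : List Char) (hp : ∀ ch ∈ p, ch ≠ '{' ∧ ch ≠ '\'') :
    List.isPrefixOf p (repOne "{Start}".toList "'2024-01-01 00:00:00'".toList x) = List.isPrefixOf p x :=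
  pinv _ _ "Start}".toList ['2','0','2','4','-','0','1','-','0','1',' ','0','0',':','0','0',':','0','0','\''] (by decide) evRepS x p hp

theorem pinv_E (x p : List Char) (hp : ∀ ch ∈ p, ch ≠ '{' ∧ ch ≠ '\'') :
    List.isPrefixOf p (repOne "{End}".toList "'2026-12-31 23:59:59'".toList x) = List.isPrefixOf p x :=
  pinv _ _ "End}".toList ['2','0','2','6','-','1','2','-','3','1',' ','2','3',':','5','9',':','5','9','\''] (by decide) evRepE x p hp

theorem pinv_S1 (x p : List Char) (hp : ∀ ch ∈ p, ch ≠ '{' ∧ ch ≠ '\'') :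
    List.isPrefixOf p (repOne "{Start_1}".toList "'2024-01-01 00:00:00'".toList x) = List.isPrefixOf p x :=
  pinv _ _ "Start_1}".toList ['2','0','2','4','-','0','1','-','0','1',' ','0','0',':','0','0',':','0','0','\''] (by decide) evRepS x p hp

theorem pinv_E1 (x p : List Char) (hp : ∀ ch ∈ p, ch ≠ '{' ∧ ch ≠ '\'') :
    List.isPrefixOf p (repOne "{End_1}".toList "'2026-12-31 23:59:59'".toList x) = List.isPrefixOf p x :=
  pinv _ _ "End_1}".toList ['2','0','2','6','-','1','2','-','3','1',' ','2','3',':','5','9',':','5','9','\''] (by decide) evRepE x p hp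

-- membership facts about the two replacement strings
theorem repS_noBrace : ∀ ch ∈ "'2024-01-01 00:00:00'".toList, ch ≠ '{' := by
  rw [evRepS]; intro ch h; fin_cases h <;> decide

theorem repE_noBrace : ∀ ch ∈ "'2026-12-31 23:59:59'".toList, ch ≠ '{' := by
  rw [evRepE]; intro ch h; fin_cases h <;> decide

-- pvF on the empty string, on a string starting with each token, and on a non-token head
theorem pvF_nil : pvF [] = [] := by
  unfold pvF; simp [repOne_nil]

theorem pvF_S (rest : List Char) :
    pvF ("{Start}".toList ++ rest) = "'2024-01-01 00:00:00'".toList ++ pvF rest := by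
  unfold pvF
  rw [repOne_match _ _ _ (by decide),
      repOne_append_noBrace "{End}".toList _ "'2024-01-01 00:00:00'".toList _ "End}".toList
        (by decide) repS_noBrace,
      repOne_append_noBrace "{Start_1}".toList _ "'2024-01-01 00:00:00'".toList _ "Start_1}".toList
        (by decide) repS_noBrace,
      repOne_append_noBrace "{End_1}".toList _ "'2024-01-01 00:00:00'".toList _ "End_1}".toList
        (by decide) repS_noBrace,
      repOne_append_noBrace "{Start_M}".toList _ "'2024-01-01 00:00:00'".toList _ "Start_M}".toList
        (by decide) repS_noBrace]

theorem pvF_E (rest : List Char) :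
    pvF ("{End}".toList ++ rest) = "'2026-12-31 23:59:59'".toList ++ pvF rest := by
  unfold pvF
  rw [repOne_pass "{Start}".toList _ "{End}".toList rest "Start}".toList "End}".toList
        (by decide) (by decide) (by rw [evEx]; intro ch h; fin_cases h <;> decide) (by simp [List.isPrefixOf]),
      repOne_match _ _ _ (by decide),
      repOne_append_noBrace "{Start_1}".toList _ "'2026-12-31 23:59:59'".toList _ "Start_1}".toList
        (by decide) repE_noBrace,
      repOne_append_noBrace "{End_1}".toList _ "'2026-12-31 23:59:59'".toList _ "End_1}".toList
        (by decide) repE_noBrace,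
      repOne_append_noBrace "{Start_M}".toList _ "'2026-12-31 23:59:59'".toList _ "Start_M}".toList
        (by decide) repE_noBrace]

theorem pvF_S1 (rest : List Char) :
    pvF ("{Start_1}".toList ++ rest) = "'2024-01-01 00:00:00'".toList ++ pvF rest := by
  unfold pvF
  rw [repOne_pass "{Start}".toList _ "{Start_1}".toList rest "Start}".toList "Start_1}".toList
        (by decide) (by decide) (by rw [evS1x]; intro ch h; fin_cases h <;> decide) (by simp [List.isPrefixOf]),
      repOne_pass "{End}".toList _ "{Start_1}".toList _ "End}".toList "Start_1}".toList
        (by decide) (by decide) (by rw [evS1x]; intro ch h; fin_cases h <;> decide) (by simp [List.isPrefixOf]),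
      repOne_match _ _ _ (by decide),
      repOne_append_noBrace "{End_1}".toList _ "'2024-01-01 00:00:00'".toList _ "End_1}".toList
        (by decide) repS_noBrace,
      repOne_append_noBrace "{Start_M}".toList _ "'2024-01-01 00:00:00'".toList _ "Start_M}".toList
        (by decide) repS_noBrace]

theorem pvF_E1 (rest : List Char) :
    pvF ("{End_1}".toList ++ rest) = "'2026-12-31 23:59:59'".toList ++ pvF rest := by
  unfold pvF
  rw [repOne_pass "{Start}".toList _ "{End_1}".toList rest "Start}".toList "End_1}".toList
        (by decide) (by decide) (by rw [evE1x]; intro ch h; fin_cases h <;> decide) (by simp [List.isPrefixOf]),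
      repOne_pass "{End}".toList _ "{End_1}".toList _ "End}".toList "End_1}".toList
        (by decide) (by decide) (by rw [evE1x]; intro ch h; fin_cases h <;> decide) (by simp [List.isPrefixOf]),
      repOne_pass "{Start_1}".toList _ "{End_1}".toList _ "Start_1}".toList "End_1}".toList
        (by decide) (by decide) (by rw [evE1x]; intro ch h; fin_cases h <;> decide) (by simp [List.isPrefixOf]),
      repOne_match _ _ _ (by decide),
      repOne_append_noBrace "{Start_M}".toList _ "'2026-12-31 23:59:59'".toList _ "Start_M}".toList
        (by decide) repE_noBrace]

theorem pvF_SM (rest : List Char) :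
    pvF ("{Start_M}".toList ++ rest) = "'2024-01-01 00:00:00'".toList ++ pvF rest := by
  unfold pvF
  rw [repOne_pass "{Start}".toList _ "{Start_M}".toList rest "Start}".toList "Start_M}".toList
        (by decide) (by decide) (by rw [evSMx]; intro ch h; fin_cases h <;> decide) (by simp [List.isPrefixOf]),
      repOne_pass "{End}".toList _ "{Start_M}".toList _ "End}".toList "Start_M}".toList
        (by decide) (by decide) (by rw [evSMx]; intro ch h; fin_cases h <;> decide) (by simp [List.isPrefixOf]),
      repOne_pass "{Start_1}".toList _ "{Start_M}".toList _ "Start_1}".toList "Start_M}".toList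
        (by decide) (by decide) (by rw [evSMx]; intro ch h; fin_cases h <;> decide) (by simp [List.isPrefixOf]),
      repOne_pass "{End_1}".toList _ "{Start_M}".toList _ "End_1}".toList "Start_M}".toList
        (by decide) (by decide) (by rw [evSMx]; intro ch h; fin_cases h <;> decide) (by simp [List.isPrefixOf]),
      repOne_match _ _ _ (by decide)]

theorem pvF_cons_neg (c : Char) (t : List Char)
    (h1 : List.isPrefixOf "{Start_1}".toList (c :: t) = false)
    (h2 : List.isPrefixOf "{Start_M}".toList (c :: t) = false)
    (h3 : List.isPrefixOf "{End_1}".toList (c :: t) = false)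
    (h4 : List.isPrefixOf "{Start}".toList (c :: t) = false)
    (h5 : List.isPrefixOf "{End}".toList (c :: t) = false) :
    pvF (c :: t) = c :: pvF t := by
  have cS : "{Start}".toList = '{' :: "Start}".toList := by decide
  have cE : "{End}".toList = '{' :: "End}".toList := by decide
  have cS1 : "{Start_1}".toList = '{' :: "Start_1}".toList := by decide
  have cE1 : "{End_1}".toList = '{' :: "End_1}".toList := by decide
  have cSM : "{Start_M}".toList = '{' :: "Start_M}".toList := by decide
  have mE : ∀ ch ∈ "End}".toList, ch ≠ '{' ∧ ch ≠ '\'' := by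
    rw [evEx]; intro ch h; fin_cases h <;> decide
  have mS1 : ∀ ch ∈ "Start_1}".toList, ch ≠ '{' ∧ ch ≠ '\'' := by
    rw [evS1x]; intro ch h; fin_cases h <;> decide
  have mE1 : ∀ ch ∈ "End_1}".toList, ch ≠ '{' ∧ ch ≠ '\'' := by
    rw [evE1x]; intro ch h; fin_cases h <;> decide
  have mSM : ∀ ch ∈ "Start_M}".toList, ch ≠ '{' ∧ ch ≠ '\'' := by
    rw [evSMx]; intro ch h; fin_cases h <;> decide
  rw [cS] at h4; rw [cE] at h5; rw [cS1] at h1; rw [cE1] at h3; rw [cSM] at h2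
  simp only [List.isPrefixOf, Bool.and_eq_false_iff] at h1 h2 h3 h4 h5
  unfold pvF
  rw [repOne_cons_neg _ _ c t (by rw [cS]; simp only [List.isPrefixOf]; rcases h4 with h | h <;> rw [h] <;> simp)]
  rw [repOne_cons_neg _ _ c _ (by
        rw [cE]; simp only [List.isPrefixOf]
        rw [pinv_S t "End}".toList mE]
        rcases h5 with h | h <;> rw [h] <;> simp)]
  rw [repOne_cons_neg _ _ c _ (by
        rw [cS1]; simp only [List.isPrefixOf]
        rw [pinv_E _ "Start_1}".toList mS1, pinv_S t "Start_1}".toList mS1]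
        rcases h1 with h | h <;> rw [h] <;> simp)]
  rw [repOne_cons_neg _ _ c _ (by
        rw [cE1]; simp only [List.isPrefixOf]
        rw [pinv_S1 _ "End_1}".toList mE1, pinv_E _ "End_1}".toList mE1,
            pinv_S t "End_1}".toList mE1]
        rcases h3 with h | h <;> rw [h] <;> simp)]
  rw [repOne_cons_neg _ _ c _ (by
        rw [cSM]; simp only [List.isPrefixOf]
        rw [pinv_E1 _ "Start_M}".toList mSM, pinv_S1 _ "Start_M}".toList mSM,
            pinv_E _ "Start_M}".toList mSM, pinv_S t "Start_M}".toList mSM]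
        rcases h2 with h | h <;> rw [h] <;> simp)]

theorem main_aux (n : Nat) : ∀ x : List Char, x.length ≤ n → pvScanGo x = pvF x := by
  induction n with
  | zero =>
    intro x hx
    have : x = [] := List.length_eq_zero_iff.mp (Nat.le_zero.mp hx)
    subst this
    rw [pvScanGo, pvF_nil]
  | succ n ih =>
    intro x hx
    cases x with
    | nil => rw [pvScanGo, pvF_nil]
    | cons c t =>
      rw [pvScanGo]
      by_cases hS1 : List.isPrefixOf "{Start_1}".toList (c :: t) = true
      · obtain ⟨rest, hr⟩ := List.isPrefixOf_iff_prefix.mp hS1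
        have hc : c = '{' := by
          have h0 := congrArg (fun l => l.head?) hr
          simpa using h0.symm
        subst hc
        simp only [if_pos rfl, hS1, if_true]
        rw [← hr, show (9 : Nat) = "{Start_1}".toList.length from by decide, List.drop_left,
            ih rest (by have := congrArg List.length hr; simp at this hx; omega), pvF_S1]
      · have hS1f : List.isPrefixOf "{Start_1}".toList (c :: t) = false := by
          cases h : List.isPrefixOf "{Start_1}".toList (c :: t) with
          | true => exact absurd h hS1 | false => rfl
        simp only [hS1f, Bool.false_eq_true, if_false]
        by_cases hSM : List.isPrefixOf "{Start_M}".toList (c :: t) = true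
        · obtain ⟨rest, hr⟩ := List.isPrefixOf_iff_prefix.mp hSM
          have hc : c = '{' := by
            have h0 := congrArg (fun l => l.head?) hr
            simpa using h0.symm
          subst hc
          simp only [if_pos rfl, hSM, if_true]
          rw [← hr, show (9 : Nat) = "{Start_M}".toList.length from by decide, List.drop_left,
              ih rest (by have := congrArg List.length hr; simp at this hx; omega), pvF_SM]
        · have hSMf : List.isPrefixOf "{Start_M}".toList (c :: t) = false := by
            cases h : List.isPrefixOf "{Start_M}".toList (c :: t) with
            | true => exact absurd h hSM | false => rfl
          simp only [hSMf, Bool.false_eq_true, if_false]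
          by_cases hE1 : List.isPrefixOf "{End_1}".toList (c :: t) = true
          · obtain ⟨rest, hr⟩ := List.isPrefixOf_iff_prefix.mp hE1
            have hc : c = '{' := by
              have h0 := congrArg (fun l => l.head?) hr
              simpa using h0.symm
            subst hc
            simp only [if_pos rfl, hE1, if_true]
            rw [← hr, show (7 : Nat) = "{End_1}".toList.length from by decide, List.drop_left,
                ih rest (by have := congrArg List.length hr; simp at this hx; omega), pvF_E1]
          · have hE1f : List.isPrefixOf "{End_1}".toList (c :: t) = false := by
              cases h : List.isPrefixOf "{End_1}".toList (c :: t) with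
              | true => exact absurd h hE1 | false => rfl
            simp only [hE1f, Bool.false_eq_true, if_false]
            by_cases hS : List.isPrefixOf "{Start}".toList (c :: t) = true
            · obtain ⟨rest, hr⟩ := List.isPrefixOf_iff_prefix.mp hS
              have hc : c = '{' := by
                have h0 := congrArg (fun l => l.head?) hr
                simpa using h0.symm
              subst hc
              simp only [if_pos rfl, hS, if_true]
              rw [← hr, show (7 : Nat) = "{Start}".toList.length from by decide, List.drop_left,
                  ih rest (by have := congrArg List.length hr; simp at this hx; omega), pvF_S]
            · have hSf : List.isPrefixOf "{Start}".toList (c :: t) = false := by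
                cases h : List.isPrefixOf "{Start}".toList (c :: t) with
                | true => exact absurd h hS | false => rfl
              simp only [hSf, Bool.false_eq_true, if_false]
              by_cases hE : List.isPrefixOf "{End}".toList (c :: t) = true
              · obtain ⟨rest, hr⟩ := List.isPrefixOf_iff_prefix.mp hE
                have hc : c = '{' := by
                  have h0 := congrArg (fun l => l.head?) hr
                  simpa using h0.symm
                subst hc
                simp only [if_pos rfl, hE, if_true]
                rw [← hr, show (5 : Nat) = "{End}".toList.length from by decide, List.drop_left,
                    ih rest (by have := congrArg List.length hr; simp at this hx; omega), pvF_E]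
              · have hEf : List.isPrefixOf "{End}".toList (c :: t) = false := by
                  cases h : List.isPrefixOf "{End}".toList (c :: t) with
                  | true => exact absurd h hE | false => rfl
                simp only [hEf, Bool.false_eq_true, if_false]
                rw [pvF_cons_neg c t hS1f hSMf hE1f hSf hEf,
                    ih t (by simp at hx; omega)]
                split <;> rfl

-- ===== VERDICT (by name: the statement is the Claim_ definition above) =====
theorem corrigir_placeholders_spec : Claim_equal_corrigir_placeholders := by
  intro query _
  unfold Spec_corrigir_placeholders corrigir_placeholders_alt
  rw [main_aux query.toList.length query.toList (le_refl _), ← A_toList]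
  simp
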